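-- pv_equiv track=rewrite | github.com/26-1-BITAmin-NLP/NLP | src/housing_agent/build/chunking.py | _norm_lines
-- ===== SOURCE A (Python) =====
-- def _norm_lines(s: str) -> str:
--
--     if not s:
--         return ""
--     lines = [ln.rstrip() for ln in s.split("\n")]
--
--     out = []
--     empty = 0
--     for ln in lines:
--         if ln.strip() == "":
--             empty += 1
--             if empty <= 2:
--                 out.append("")
--         else:
--             empty = 0
--             out.append(ln.strip())
--     return "\n".join(out).strip()
-- ===== SOURCE B (Python) =====
-- import re
--
-- def _norm_lines(s: str) -> str:
--     if not s:
--         return ""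
--     text = "\n".join(l.strip() for l in s.split("\n"))
--     return re.sub(r"\n{4,}", "\n\n\n", text).strip()
-- ===== Notes on version B (the rewrite author's own statement) =====
-- stated objective: idiomatic
-- what changed: A's per-line loop with a blank-run counter and conditional appends is replaced by joining the stripped lines into one string and collapsing every run of 4+ newlines to 3 with a single regex substitution (re.sub), then stripping.
import Mathlib
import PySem

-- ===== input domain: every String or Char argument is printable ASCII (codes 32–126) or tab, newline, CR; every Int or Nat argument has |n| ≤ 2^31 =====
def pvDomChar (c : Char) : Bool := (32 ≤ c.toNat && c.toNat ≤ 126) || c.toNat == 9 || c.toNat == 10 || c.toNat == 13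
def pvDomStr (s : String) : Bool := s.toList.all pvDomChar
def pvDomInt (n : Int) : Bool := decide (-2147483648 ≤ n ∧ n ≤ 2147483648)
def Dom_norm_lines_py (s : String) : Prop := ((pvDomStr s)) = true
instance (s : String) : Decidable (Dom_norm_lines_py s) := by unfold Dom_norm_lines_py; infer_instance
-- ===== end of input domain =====

-- B replaces A's per-line blank-run counter loop by join-then-regex: strip each line, join, collapse
-- every run of 4+ newlines to 3 with one substitution pass, then strip (objective: idiomatic).

-- ===== PORT A =====
-- loop body of A's 'for ln in lines' with accumulator (out, empty)
def normAStep (acc : List (List Char) × Int) (ln : List Char) : List (List Char) × Int :=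
  if PySem.Chars.strip ln = [] then
    let empty := acc.2 + 1
    (if empty ≤ 2 then acc.1 ++ [([] : List Char)] else acc.1, empty)
  else
    (acc.1 ++ [PySem.Chars.strip ln], (0 : Int))

def norm_lines_py (s : String) : String :=
  if s = "" then ""
  else
    let lines := (PySem.Chars.splitOn s.toList ['\n']).map PySem.Chars.rstrip
    let out := (lines.foldl normAStep ([], 0)).1
    String.ofList (PySem.Chars.strip (PySem.Chars.join ['\n'] out))

-- ===== PORT B =====
-- hand port of re.sub(r"\n{4,}", "\n\n\n", ·), exact for this fixed pattern: a single scan that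
-- emits each maximal newline run capped at 3 (runs of 1..3 newlines are unchanged, 4+ become 3)
def collapseGo : Nat → List Char → List Char
  | pending, [] => List.replicate (min pending 3) '\n'
  | pending, c :: rest =>
    if c = '\n' then collapseGo (pending + 1) rest
    else List.replicate (min pending 3) '\n' ++ c :: collapseGo 0 rest

def norm_lines_py_alt (s : String) : String :=
  if s = "" then ""
  else
    let text := PySem.Chars.join ['\n'] ((PySem.Chars.splitOn s.toList ['\n']).map PySem.Chars.strip)
    String.ofList (PySem.Chars.strip (collapseGo 0 text))

-- ===== PRECONDITION & SPEC =====
def Spec_norm_lines_py (s : String) (out : String) : Prop := out = norm_lines_py_alt s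
instance (s : String) (out : String) : Decidable (Spec_norm_lines_py s out) := by unfold Spec_norm_lines_py; infer_instance

-- ===== CLAIM (what is proved, stated in full; the proofs are below) =====
def Claim_equal_norm_lines_py : Prop := ∀ (s : String), Dom_norm_lines_py s → Spec_norm_lines_py s (norm_lines_py s)

-- ===== LEMMAS AND PROOFS =====

-- abbreviations used only by the proofs
def pvGA (acc : List (List Char) × Int) (x : List Char) : List (List Char) × Int :=
  if x = [] then
    (if acc.2 + 1 ≤ 2 then acc.1 ++ [([] : List Char)] else acc.1, acc.2 + 1)
  else (acc.1 ++ [x], (0 : Int))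

def pvCapA (t : List (List Char)) : List (List Char) := (t.foldl pvGA ([], 0)).1

def pvJ (t : List (List Char)) : List Char := t.flatMap (fun y => '\n' :: y)

-- ---- generic strip facts ----
lemma pv_rstrip_cons (c : Char) (t : List Char) :
    PySem.Chars.rstrip (c :: t) =
      if PySem.Chars.rstrip t = [] then (if PySem.Chars.isspace c then [] else [c])
      else c :: PySem.Chars.rstrip t := by
  simp only [PySem.Chars.rstrip, List.reverse_cons, List.dropWhile_append,
    List.reverse_eq_nil_iff]
  by_cases h : List.dropWhile PySem.Chars.isspace t.reverse = [] <;>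
    by_cases hc : PySem.Chars.isspace c <;>
      simp [h, hc, List.dropWhile, List.isEmpty_iff]

lemma pv_lstrip_cons_of_space (c : Char) (t : List Char) (hc : PySem.Chars.isspace c = true) :
    PySem.Chars.lstrip (c :: t) = PySem.Chars.lstrip t := by
  simp [PySem.Chars.lstrip, List.dropWhile, hc]

lemma pv_lstrip_cons_of_not_space (c : Char) (t : List Char) (hc : PySem.Chars.isspace c = false) :
    PySem.Chars.lstrip (c :: t) = c :: t := by
  simp [PySem.Chars.lstrip, List.dropWhile, hc]

lemma pv_lstrip_rstrip_comm (l : List Char) :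
    PySem.Chars.lstrip (PySem.Chars.rstrip l) = PySem.Chars.rstrip (PySem.Chars.lstrip l) := by
  induction l with
  | nil => rfl
  | cons c t ih =>
    by_cases hc : PySem.Chars.isspace c
    · rw [pv_rstrip_cons, pv_lstrip_cons_of_space c t hc]
      by_cases h : PySem.Chars.rstrip t = []
      · simp only [h, if_true, hc]
        have : PySem.Chars.rstrip (PySem.Chars.lstrip t) = [] := by
          rw [← ih, h]; rfl
        simpa [PySem.Chars.lstrip] using this.symm
      · simp only [h, if_false, pv_lstrip_cons_of_space c _ hc]
        exact ih
    · have hc' : PySem.Chars.isspace c = false := by simpa using hc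
      rw [pv_rstrip_cons, pv_lstrip_cons_of_not_space c t hc', pv_rstrip_cons]
      by_cases h : PySem.Chars.rstrip t = [] <;>
        simp [h, hc', PySem.Chars.lstrip]

lemma pv_strip_rstrip (l : List Char) : PySem.Chars.strip (PySem.Chars.rstrip l) = PySem.Chars.strip l := by
  simp only [PySem.Chars.strip]
  rw [pv_lstrip_rstrip_comm]
  simp only [PySem.Chars.rstrip, List.reverse_reverse]
  rw [List.dropWhile_idempotent]

lemma pv_strip_idem (l : List Char) : PySem.Chars.strip (PySem.Chars.strip l) = PySem.Chars.strip l := by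
  simp only [PySem.Chars.strip]
  rw [pv_lstrip_rstrip_comm (PySem.Chars.lstrip l)]
  simp only [PySem.Chars.lstrip, List.dropWhile_idempotent]
  simp only [PySem.Chars.rstrip, List.reverse_reverse, List.dropWhile_idempotent]

lemma pv_strip_sublist (l : List Char) : (PySem.Chars.strip l).Sublist l := by
  have h1 : (PySem.Chars.lstrip l).Sublist l := by
    simpa [PySem.Chars.lstrip] using List.dropWhile_sublist (l := l) PySem.Chars.isspace
  have h2 : (PySem.Chars.rstrip (PySem.Chars.lstrip l)).Sublist (PySem.Chars.lstrip l) := by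
    have := (List.dropWhile_sublist (l := (PySem.Chars.lstrip l).reverse) PySem.Chars.isspace).reverse
    simpa [PySem.Chars.rstrip] using this
  simpa [PySem.Chars.strip] using h2.trans h1

lemma pv_lstrip_nl_prefix (m : Nat) (z : List Char) :
    PySem.Chars.lstrip (List.replicate m '\n' ++ z) = PySem.Chars.lstrip z := by
  simp [PySem.Chars.lstrip, (by decide : PySem.Chars.isspace '\n' = true)]

lemma pv_rstrip_nl_suffix (m : Nat) (w : List Char) :
    PySem.Chars.rstrip (w ++ List.replicate m '\n') = PySem.Chars.rstrip w := by
  simp [PySem.Chars.rstrip, List.reverse_append, List.reverse_replicate,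
    (by decide : PySem.Chars.isspace '\n' = true)]

lemma pv_strip_nl_run (m : Nat) : PySem.Chars.strip (List.replicate m '\n') = [] := by
  have h := pv_lstrip_nl_prefix m []
  simp only [List.append_nil] at h
  simp only [PySem.Chars.strip, h]
  rfl

-- a stripped nonempty string starts with a non-whitespace character, so lstrip leaves it alone
lemma pv_lstrip_of_stripped (x z : List Char) (hx : PySem.Chars.strip x = x) (hne : x ≠ []) :
    PySem.Chars.lstrip (x ++ z) = x ++ z := by
  have hsub : (PySem.Chars.lstrip x) <:+ x := by
    simpa [PySem.Chars.lstrip] using List.dropWhile_suffix (l := x) PySem.Chars.isspace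
  have hlen2 : (PySem.Chars.rstrip (PySem.Chars.lstrip x)).length ≤ (PySem.Chars.lstrip x).length := by
    simpa [PySem.Chars.rstrip] using List.length_dropWhile_le PySem.Chars.isspace (PySem.Chars.lstrip x).reverse
  have hx' : PySem.Chars.rstrip (PySem.Chars.lstrip x) = x := hx
  have hlen3 := congrArg List.length hx'
  have hlen4 := hsub.length_le
  have hls : PySem.Chars.lstrip x = x := hsub.eq_of_length (by omega)
  obtain ⟨c, x', rfl⟩ := List.exists_cons_of_ne_nil hne
  have hdw : List.dropWhile PySem.Chars.isspace (c :: x') = c :: x' := by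
    simpa [PySem.Chars.lstrip] using hls
  have hc : PySem.Chars.isspace c = false := by
    have h0 := List.dropWhile_eq_self_iff.mp hdw (by simp)
    simpa using h0
  simpa using pv_lstrip_cons_of_not_space c (x' ++ z) hc

-- ---- A-side fold facts ----
lemma pv_foldl_ga_acc (t : List (List Char)) (acc : List (List Char)) (e : Int) :
    (t.foldl pvGA (acc, e)).1 = acc ++ (t.foldl pvGA ([], e)).1 ∧
    (t.foldl pvGA (acc, e)).2 = (t.foldl pvGA ([], e)).2 := by
  induction t generalizing acc e with
  | nil => simp
  | cons x t ih =>
    simp only [List.foldl_cons]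
    rcases hq : pvGA ([], e) x with ⟨q, e'⟩
    have h2 : pvGA (acc, e) x = (acc ++ q, e') := by
      have h3 : pvGA (acc, e) x = (acc ++ (pvGA ([], e) x).1, (pvGA ([], e) x).2) := by
        by_cases hx : x = [] <;> by_cases he : e + 1 ≤ 2 <;> simp [pvGA, hx, he]
      rw [h3, hq]
    rw [h2]
    constructor
    · rw [(ih (acc ++ q) e').1, (ih q e').1, List.append_assoc]
    · rw [(ih (acc ++ q) e').2, (ih q e').2]

lemma pv_ga_blankrun (k : Nat) (e : Nat) (acc : List (List Char)) :
    (List.replicate k ([] : List Char)).foldl pvGA (acc, (e : Int)) =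
      (acc ++ List.replicate (min k (2 - min e 2)) ([] : List Char), ((e + k : Nat) : Int)) := by
  induction k generalizing e acc with
  | zero => simp
  | succ k ih =>
    rw [List.replicate_succ, List.foldl_cons]
    have hstep : pvGA (acc, (e : Int)) [] =
        (if e + 1 ≤ 2 then acc ++ [([] : List Char)] else acc, ((e + 1 : Nat) : Int)) := by
      by_cases he : e + 1 ≤ 2
      · have he' : (e : Int) + 1 ≤ 2 := by omega
        simp [pvGA, he, he']
      · have he' : ¬ ((e : Int) + 1 ≤ 2) := by omega
        simp [pvGA, he, he']
    rw [hstep]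
    by_cases he : e + 1 ≤ 2
    · rw [if_pos he, ih (e + 1)]
      refine Prod.ext ?_ (by simp; omega)
      simp only [List.append_assoc]
      congr 1
      have hmin : min (k + 1) (2 - min e 2) = min k (2 - min (e + 1) 2) + 1 := by omega
      rw [hmin, List.replicate_succ]
      simp
    · rw [if_neg he, ih (e + 1)]
      refine Prod.ext ?_ (by simp; omega)
      have hmin : min (k + 1) (2 - min e 2) = min k (2 - min (e + 1) 2) := by omega
      rw [hmin]

lemma pv_capA_blanks (n : Nat) :
    pvCapA (List.replicate n ([] : List Char)) = List.replicate (min n 2) ([] : List Char) := by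
  unfold pvCapA
  have := pv_ga_blankrun n 0 []
  norm_num at this
  rw [this]

lemma pv_capA_run_cons (k : Nat) (y : List Char) (t : List (List Char)) (hy : y ≠ []) :
    pvCapA (List.replicate k ([] : List Char) ++ y :: t) =
      List.replicate (min k 2) ([] : List Char) ++ y :: pvCapA t := by
  unfold pvCapA
  rw [List.foldl_append]
  have h1 := pv_ga_blankrun k 0 []
  norm_num at h1
  rw [h1, List.foldl_cons]
  have h2 : pvGA (List.replicate (min k 2) ([] : List Char), ((k : Nat) : Int)) y =
      (List.replicate (min k 2) ([] : List Char) ++ [y], (0 : Int)) := by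
    simp [pvGA, hy]
  rw [h2]
  have h3 := (pv_foldl_ga_acc t (List.replicate (min k 2) ([] : List Char) ++ [y]) 0).1
  rw [h3]
  simp [List.append_assoc]

-- every list of lines is a blank run followed by nothing or a nonblank line
lemma pv_lines_decomp (ls : List (List Char)) :
    (∃ n, ls = List.replicate n ([] : List Char)) ∨
    (∃ k y t, y ≠ [] ∧ ls = List.replicate k ([] : List Char) ++ y :: t) := by
  by_cases h : List.dropWhile (fun x => x.isEmpty) ls = []
  · left
    refine ⟨ls.length, ?_⟩
    apply List.eq_replicate_of_mem
    intro b hb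
    have : b ∈ List.takeWhile (fun x => x.isEmpty) ls := by
      rw [← List.takeWhile_append_dropWhile (p := fun x => x.isEmpty) (l := ls), h] at hb
      simpa using hb
    simpa using List.mem_takeWhile_imp this
  · right
    obtain ⟨y, t, hyt⟩ := List.exists_cons_of_ne_nil h
    refine ⟨(List.takeWhile (fun x => x.isEmpty) ls).length, y, t, ?_, ?_⟩
    · have : List.dropWhile (fun x => x.isEmpty) (y :: t) = y :: t := by
        rw [← hyt]
        exact List.dropWhile_idempotent _ _
      have hy := List.dropWhile_eq_self_iff.mp this (by simp)
      simpa using hy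
    · conv_lhs => rw [← List.takeWhile_append_dropWhile (p := fun x => x.isEmpty) (l := ls)]
      rw [hyt]
      congr 1
      apply List.eq_replicate_of_mem
      intro b hb
      simpa using List.mem_takeWhile_imp hb

-- ---- B-side scan facts ----
lemma pv_collapseGo_run (p k : Nat) (z : List Char) :
    collapseGo p (List.replicate k '\n' ++ z) = collapseGo (p + k) z := by
  induction k generalizing p with
  | zero => simp
  | succ k ih =>
    rw [List.replicate_succ, List.cons_append]
    rw [show collapseGo p ('\n' :: (List.replicate k '\n' ++ z)) =
        collapseGo (p + 1) (List.replicate k '\n' ++ z) from by simp [collapseGo]]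
    rw [ih]
    congr 1
    omega

lemma pv_collapseGo_no_nl (x z : List Char) (hx : '\n' ∉ x) :
    collapseGo 0 (x ++ z) = x ++ collapseGo 0 z := by
  induction x with
  | nil => simp
  | cons c x ih =>
    have hc : c ≠ '\n' := fun h => hx (h ▸ List.mem_cons_self)
    have hx' : '\n' ∉ x := fun h => hx (List.mem_cons_of_mem _ h)
    simp only [List.cons_append, collapseGo, if_neg hc, ih hx']
    simp

-- ---- join facts ----
lemma pv_J_blanks (m : Nat) : pvJ (List.replicate m ([] : List Char)) = List.replicate m '\n' := by
  induction m with
  | zero => simp [pvJ]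
  | succ m ih => simp [pvJ, List.replicate_succ] at ih ⊢; simpa using ih

lemma pv_join_cons (y : List Char) (t : List (List Char)) :
    PySem.Chars.join ['\n'] (y :: t) = y ++ pvJ t := by
  induction t generalizing y with
  | nil => simp [PySem.Chars.join_singleton, pvJ]
  | cons z t ih =>
    rw [PySem.Chars.join_cons_cons, ih z]
    simp [pvJ, List.append_assoc]

lemma pv_join_blanks (n : Nat) :
    PySem.Chars.join ['\n'] (List.replicate n ([] : List Char)) = List.replicate (n - 1) '\n' := by
  cases n with
  | zero => simp [PySem.Chars.join, List.intercalate]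
  | succ n =>
    rw [List.replicate_succ, pv_join_cons, pv_J_blanks]
    simp


lemma pv_join_run_cons (m : Nat) (y : List Char) (t : List (List Char)) :
    PySem.Chars.join ['\n'] (List.replicate m ([] : List Char) ++ y :: t) =
      List.replicate m '\n' ++ y ++ pvJ t := by
  cases m with
  | zero => simpa using pv_join_cons y t
  | succ m =>
    rw [List.replicate_succ, List.cons_append, pv_join_cons]
    have : pvJ (List.replicate m ([] : List Char) ++ y :: t) =
        List.replicate m '\n' ++ '\n' :: (y ++ pvJ t) := by
      simp only [pvJ, List.flatMap_append] at *
      rw [← pvJ, ← pvJ, pv_J_blanks]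
      simp [pvJ]
    rw [this,
      show List.replicate m '\n' ++ '\n' :: (y ++ pvJ t) =
        (List.replicate m '\n' ++ ['\n']) ++ (y ++ pvJ t) by simp,
      ← List.replicate_succ']
    simp [List.append_assoc]

-- ---- the tail invariant: interior blank runs agree exactly, trailing runs agree up to rstrip ----
lemma pv_J_append (a b : List (List Char)) : pvJ (a ++ b) = pvJ a ++ pvJ b := by
  simp [pvJ]

lemma pv_J_cons (y : List Char) (t : List (List Char)) :
    pvJ (y :: t) = '\n' :: (y ++ pvJ t) := by
  simp [pvJ]

lemma pv_tail_eq_aux (n : Nat) : ∀ (rest : List (List Char)), rest.length ≤ n →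
    (∀ x ∈ rest, '\n' ∉ x) →
    ∀ w : List Char,
      PySem.Chars.rstrip (w ++ pvJ (pvCapA rest)) =
        PySem.Chars.rstrip (w ++ collapseGo 0 (pvJ rest)) := by
  induction n with
  | zero =>
    intro rest hlen h w
    have hnil : rest = [] := List.eq_nil_of_length_eq_zero (by omega)
    subst hnil
    simp [pvCapA, pvJ, collapseGo]
  | succ n ih =>
    intro rest hlen h w
    rcases pv_lines_decomp rest with ⟨m, rfl⟩ | ⟨k, y, t, hy, rfl⟩
    · rw [pv_capA_blanks, pv_J_blanks, pv_J_blanks, pv_rstrip_nl_suffix]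
      rw [show collapseGo 0 (List.replicate m '\n') =
            collapseGo 0 (List.replicate m '\n' ++ []) by simp,
          pv_collapseGo_run,
          show collapseGo (0 + m) ([] : List Char) =
            List.replicate (min (0 + m) 3) '\n' from rfl,
          pv_rstrip_nl_suffix]
    · have hyn : '\n' ∉ y := h y (by simp)
      obtain ⟨c, y', rfl⟩ := List.exists_cons_of_ne_nil hy
      have hc : c ≠ '\n' := fun hh => hyn (hh ▸ List.mem_cons_self)
      have hy' : '\n' ∉ y' := fun hh => hyn (List.mem_cons_of_mem _ hh)
      have hlt : t.length ≤ n := by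
        simp [List.length_append] at hlen
        omega
      have hrec := ih t hlt (fun x hx => h x (by simp [hx]))
        (w ++ List.replicate (min k 2) '\n' ++ '\n' :: (c :: y'))
      rw [pv_capA_run_cons k _ t hy]
      have e1 : w ++ pvJ (List.replicate (min k 2) ([] : List Char) ++ (c :: y') :: pvCapA t)
          = (w ++ List.replicate (min k 2) '\n' ++ '\n' :: (c :: y')) ++ pvJ (pvCapA t) := by
        simp [pv_J_append, pv_J_blanks, pv_J_cons, List.append_assoc]
      rw [e1, hrec]
      have e2 : pvJ (List.replicate k ([] : List Char) ++ (c :: y') :: t)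
          = List.replicate (k + 1) '\n' ++ ((c :: y') ++ pvJ t) := by
        simp [pv_J_append, pv_J_blanks, pv_J_cons, List.replicate_succ', List.append_assoc]
      rw [e2, pv_collapseGo_run]
      have e3 : collapseGo (0 + (k + 1)) ((c :: y') ++ pvJ t)
          = List.replicate (min (k + 1) 3) '\n' ++ c :: collapseGo 0 (y' ++ pvJ t) := by
        simp only [List.cons_append, collapseGo, if_neg hc]
        congr 2
        omega
      rw [e3, pv_collapseGo_no_nl y' _ hy']
      have hmin : min (k + 1) 3 = min k 2 + 1 := by omega
      rw [hmin]
      congr 1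
      simp [List.replicate_succ', List.append_assoc]

lemma pv_tail_eq (rest : List (List Char))
    (h : ∀ x ∈ rest, '\n' ∉ x) :
    ∀ w : List Char,
      PySem.Chars.rstrip (w ++ pvJ (pvCapA rest)) =
        PySem.Chars.rstrip (w ++ collapseGo 0 (pvJ rest)) :=
  pv_tail_eq_aux rest.length rest le_rfl h

-- ---- the main list-level equality ----
lemma pv_main (ls : List (List Char)) (h : ∀ x ∈ ls, PySem.Chars.strip x = x ∧ '\n' ∉ x) :
    PySem.Chars.strip (PySem.Chars.join ['\n'] (pvCapA ls)) =
      PySem.Chars.strip (collapseGo 0 (PySem.Chars.join ['\n'] ls)) := by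
  rcases pv_lines_decomp ls with ⟨m, rfl⟩ | ⟨k, y, t, hy, rfl⟩
  · rw [pv_capA_blanks, pv_join_blanks, pv_join_blanks, pv_strip_nl_run]
    rw [show collapseGo 0 (List.replicate (m - 1) '\n') =
          collapseGo 0 (List.replicate (m - 1) '\n' ++ []) by simp,
        pv_collapseGo_run,
        show collapseGo (0 + (m - 1)) ([] : List Char) =
          List.replicate (min (0 + (m - 1)) 3) '\n' from rfl,
        pv_strip_nl_run]
  · have hstr : PySem.Chars.strip y = y := (h y (by simp)).1
    have hyn : '\n' ∉ y := (h y (by simp)).2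
    obtain ⟨c, y', rfl⟩ := List.exists_cons_of_ne_nil hy
    have hc : c ≠ '\n' := fun hh => hyn (hh ▸ List.mem_cons_self)
    have hy' : '\n' ∉ y' := fun hh => hyn (List.mem_cons_of_mem _ hh)
    rw [pv_capA_run_cons k _ t hy, pv_join_run_cons, pv_join_run_cons]
    have hL : PySem.Chars.strip (List.replicate (min k 2) '\n' ++ (c :: y') ++ pvJ (pvCapA t))
        = PySem.Chars.rstrip ((c :: y') ++ pvJ (pvCapA t)) := by
      simp only [PySem.Chars.strip, List.append_assoc]
      rw [pv_lstrip_nl_prefix, pv_lstrip_of_stripped _ _ hstr (by simp)]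
    rw [hL]
    have e2 : List.replicate k '\n' ++ (c :: y') ++ pvJ t
        = List.replicate k '\n' ++ ((c :: y') ++ pvJ t) := by
      simp [List.append_assoc]
    rw [e2, pv_collapseGo_run]
    have e3 : collapseGo (0 + k) ((c :: y') ++ pvJ t)
        = List.replicate (min k 3) '\n' ++ c :: collapseGo 0 (y' ++ pvJ t) := by
      simp only [List.cons_append, collapseGo, if_neg hc]
      congr 2
      omega
    rw [e3, pv_collapseGo_no_nl y' _ hy']
    have hR : PySem.Chars.strip (List.replicate (min k 3) '\n' ++ c :: (y' ++ collapseGo 0 (pvJ t)))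
        = PySem.Chars.rstrip ((c :: y') ++ collapseGo 0 (pvJ t)) := by
      simp only [PySem.Chars.strip]
      rw [pv_lstrip_nl_prefix]
      have := pv_lstrip_of_stripped (c :: y') (collapseGo 0 (pvJ t)) hstr (by simp)
      simp only [List.cons_append] at this ⊢
      rw [this]
    rw [hR]
    exact pv_tail_eq t (fun x hx => (h x (by simp [hx])).2) (c :: y')

-- pieces of splitOn by '\n' contain no '\n'
lemma pv_splitOn_go_no_nl (fuel : Nat) (l cur : List Char) (acc : List (List Char))
    (hf : l.length < fuel) (hcur : '\n' ∉ cur) (hacc : ∀ p ∈ acc, '\n' ∉ p) :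
    ∀ p ∈ PySem.Chars.splitOn.go ['\n'] fuel l cur acc, '\n' ∉ p := by
  induction fuel generalizing l cur acc with
  | zero => omega
  | succ fuel ih =>
    intro p hp
    cases l with
    | nil =>
      unfold PySem.Chars.splitOn.go at hp
      simp at hp
      rcases hp with h | h
      · exact hacc p h
      · subst h
        exact fun hm => hcur (by simpa using hm)
    | cons c rest =>
      unfold PySem.Chars.splitOn.go at hp
      by_cases hpre : List.isPrefixOf ['\n'] (c :: rest)
      · rw [if_pos hpre] at hp
        have hcn : c = '\n' := by
          have := by simpa [List.isPrefixOf] using hpre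
          exact this.symm
        refine ih (List.drop 1 (c :: rest)) [] (cur.reverse :: acc)
          (by simp at hf ⊢; omega) (by simp) ?_ p hp
        intro q hq
        rcases List.mem_cons.mp hq with rfl | hq'
        · exact fun hm => hcur (by simpa using hm)
        · exact hacc q hq'
      · rw [if_neg hpre] at hp
        have hcn : c ≠ '\n' := by
          simp [List.isPrefixOf] at hpre
          exact fun hh => hpre (by simp [hh])
        refine ih rest (c :: cur) acc (by simp at hf ⊢; omega) ?_ hacc p hp
        intro hm
        rcases List.mem_cons.mp hm with rfl | hm'
        · exact hcn rfl
        · exact hcur hm'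

lemma pv_splitOn_no_nl (cs : List Char) : ∀ p ∈ PySem.Chars.splitOn cs ['\n'], '\n' ∉ p := by
  intro p hp
  exact pv_splitOn_go_no_nl (cs.length + 1) cs [] [] (by omega) (by simp) (by simp) p hp

-- ===== VERDICT (by name: the statement is the Claim_ definition above) =====
theorem norm_lines_py_spec : Claim_equal_norm_lines_py := by
  unfold Claim_equal_norm_lines_py
  intro s _
  unfold Spec_norm_lines_py
  by_cases hs : s = ""
  · simp [norm_lines_py, norm_lines_py_alt, hs]
  · simp only [norm_lines_py, norm_lines_py_alt, if_neg hs]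
    congr 1
    have hfold : (((PySem.Chars.splitOn s.toList ['\n']).map PySem.Chars.rstrip).foldl
          normAStep (([] : List (List Char)), (0 : Int))).1
        = pvCapA ((PySem.Chars.splitOn s.toList ['\n']).map PySem.Chars.strip) := by
      rw [List.foldl_map]
      have hfun : (fun (a : List (List Char) × Int) p => normAStep a (PySem.Chars.rstrip p))
          = (fun a p => pvGA a (PySem.Chars.strip p)) := by
        funext a p
        simp only [normAStep, pvGA, pv_strip_rstrip]
      rw [hfun, ← List.foldl_map]
      rfl
    rw [hfold]
    apply pv_main
    intro x hx
    obtain ⟨p, hp, rfl⟩ := List.mem_map.mp hx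
    refine ⟨pv_strip_idem p, fun hmem => ?_⟩
    exact pv_splitOn_no_nl s.toList p hp ((pv_strip_sublist p).mem hmem)
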